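-- pv_equiv track=rewrite | github.com/lucasjinhong/jenkins-letp | roles/env/files/HL78xx/test_at_sms_cmgs.py | buildPduDa
-- ===== SOURCE A (Python) =====
-- def buildPduDa(number,TypeOfAddress):
--     #First PDU Byte: Length of phone number
--     #Second PDU Byte: Type of Address: '91' (international) / '81' (national)
--     #Validation Autotest: temp = '0B91'
--     #Amarisoft: temp = '0381'
--     s = list(number.lstrip('+'))
--
--     if len(s) > 9:
--         n = len(s)
--         n_hex = hex(n).strip("0x").capitalize()
--         temp = '0%s'%n_hex + TypeOfAddress
--     else:
--         n = len(s)
--         temp = '0%s'%n + TypeOfAddress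
--
--     if n%2 == 0:
--         i=1
--         while(i < n):
--             temp += s[i] + s[i-1]
--             i += 2
--     else:
--         i=1
--         while(i < n-1):
--             temp += s[i] + s[i-1]
--             i += 2
--         temp += 'F' + s[n-1]
--     return temp
-- ===== SOURCE B (Python) =====
-- def buildPduDa(number, TypeOfAddress):
--     s = number.lstrip('+')
--     n = len(s)
--     head = '0' + (hex(n).strip("0x").capitalize() if n > 9 else str(n))
--     # columns: even-position digits zipped with odd-position digits; the 'F'
--     # sentinel pads the odd column (zip truncation discards it when n is even)
--     return head + TypeOfAddress + ''.join(b + a for a, b in zip(s[::2], s[1::2] + 'F'))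
-- ===== Notes on version B (the rewrite author's own statement) =====
-- stated objective: simpler
-- what changed: A's two even/odd index while-loops growing the result by repeated string concatenation are replaced by a column decomposition: the digit string is split into its even- and odd-position strided subsequences, the odd column gets a trailing 'F' sentinel, and one zip-interleave join yields the swapped body with no index loop or parity branch.
import Mathlib
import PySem

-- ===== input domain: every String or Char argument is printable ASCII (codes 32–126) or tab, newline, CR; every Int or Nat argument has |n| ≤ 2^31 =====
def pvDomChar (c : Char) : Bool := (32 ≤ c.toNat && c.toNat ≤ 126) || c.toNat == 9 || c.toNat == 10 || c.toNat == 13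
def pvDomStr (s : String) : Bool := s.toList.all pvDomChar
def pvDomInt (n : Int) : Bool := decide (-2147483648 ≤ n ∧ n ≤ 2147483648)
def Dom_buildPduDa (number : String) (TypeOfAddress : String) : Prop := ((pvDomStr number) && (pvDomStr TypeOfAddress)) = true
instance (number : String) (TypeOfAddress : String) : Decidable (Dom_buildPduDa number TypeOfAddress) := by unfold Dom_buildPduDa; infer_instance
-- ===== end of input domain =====

-- B replaces A's two even/odd index while-loops by a column decomposition: the
-- even- and odd-position strided subsequences are zip-interleaved, with an 'F'
-- sentinel padding the odd column (objective: simpler); the header is kept verbatim.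

-- ===== PORT A =====
-- hex digits of n, lowercase (hex(n) without the '0x' prefix); exact for n > 0,
-- and both ports only apply it with n > 9
def hexDigitChar (k : Nat) : Char := if k < 10 then Char.ofNat (48 + k) else Char.ofNat (87 + k)
def hexDigitsAux : Nat → List Char
  | 0 => []
  | n+1 => hexDigitsAux ((n+1)/16) ++ [hexDigitChar ((n+1)%16)]
decreasing_by exact Nat.div_lt_self (Nat.succ_pos n) (by omega)

-- str.capitalize(): first char uppercased, the rest lowercased (exact on ASCII)
def pyCapitalize : List Char → List Char
  | [] => []
  | c :: t => PySem.Chars.upperChar c :: t.map PySem.Chars.lowerChar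

-- A's while-loops: while i < stop: temp += s[i] + s[i-1]; i += 2.
-- s.getD is Python's s[i]: every reachable call has 0 ≤ i-1 and i < stop ≤ len(s).
def loopA (s : List Char) (stop : Nat) (i : Nat) (acc : List Char) : List Char :=
  if i < stop then
    loopA s stop (i+2) (acc ++ [s.getD i ' ', s.getD (i-1) ' '])
  else acc
termination_by stop - i

def buildPduDa (number : String) (TypeOfAddress : String) : String :=
  let s := number.toList.dropWhile (fun c => c == '+')   -- number.lstrip('+')
  let n := s.length
  let temp :=
    (if n > 9 then
      -- '0%s' % hex(n).strip("0x").capitalize()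
      '0' :: pyCapitalize (PySem.Chars.stripChars ('0' :: 'x' :: hexDigitsAux n) ['0', 'x'])
    else
      '0' :: PySem.Int.toChars (n : Int)) ++ TypeOfAddress.toList
  if n % 2 == 0 then
    String.ofList (loopA s n 1 temp)
  else
    String.ofList (loopA s (n-1) 1 temp ++ ['F', s.getD (n-1) ' '])

-- ===== PORT B =====
-- Source B: head + TypeOfAddress + ''.join(b + a for a, b in zip(s[::2], s[1::2] + 'F')).
-- s[::2] and s[1::2] are PySem.List.slice? with step 2 (step ≠ 0, so always `some`,
-- read off with getD []); zip truncates at the shorter column as in Python.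
def buildPduDa_alt (number : String) (TypeOfAddress : String) : String :=
  let s := number.toList.dropWhile (fun c => c == '+')
  let n := s.length
  let head :=
    if n > 9 then
      '0' :: pyCapitalize (PySem.Chars.stripChars ('0' :: 'x' :: hexDigitsAux n) ['0', 'x'])
    else
      '0' :: PySem.Int.toChars (n : Int)
  let evens := (PySem.List.slice? s none none 2).getD []        -- s[::2]
  let odds  := (PySem.List.slice? s (some 1) none 2).getD []    -- s[1::2]
  String.ofList (head ++ TypeOfAddress.toList ++
    (List.zip evens (odds ++ ['F'])).flatMap (fun p => [p.2, p.1]))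

-- ===== PRECONDITION & SPEC =====
def Spec_buildPduDa (number : String) (TypeOfAddress : String) (out : String) : Prop := out = buildPduDa_alt number TypeOfAddress
instance (number : String) (TypeOfAddress : String) (out : String) : Decidable (Spec_buildPduDa number TypeOfAddress out) := by unfold Spec_buildPduDa; infer_instance

-- ===== CLAIM (what is proved, stated in full; the proofs are below) =====
def Claim_equal_buildPduDa : Prop := ∀ (number : String) (TypeOfAddress : String), Dom_buildPduDa number TypeOfAddress → Spec_buildPduDa number TypeOfAddress (buildPduDa number TypeOfAddress)

-- ===== LEMMAS AND PROOFS =====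

-- proof-side normal forms
def swapPairs : List Char → List Char
  | [] => []
  | [_] => []
  | a :: b :: t => b :: a :: swapPairs t

def every2 : List Char → List Char
  | [] => []
  | [a] => [a]
  | a :: _ :: t => a :: every2 t

-- A's pair loop accumulates exactly the swapped pairs of the 2*m elements from index i-1 on
theorem loopA_eq (m : Nat) : ∀ (s : List Char) (i : Nat) (acc : List Char),
    1 ≤ i → i - 1 + 2*m ≤ s.length →
    loopA s (i - 1 + 2*m) i acc = acc ++ swapPairs ((s.drop (i-1)).take (2*m)) := by
  induction m with
  | zero =>
    intro s i acc hi _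
    rw [loopA, if_neg (by omega)]
    simp [swapPairs]
  | succ m ih =>
    intro s i acc hi hlen
    have hi1 : i - 1 < s.length := by omega
    have hi2 : i < s.length := by omega
    rw [loopA, if_pos (by omega : i < i - 1 + 2*(m+1))]
    have hstep : i - 1 + 2*(m+1) = (i+2) - 1 + 2*m := by omega
    rw [hstep, ih s (i+2) _ (by omega) (by omega)]
    have hd1 : s.drop (i-1) = s[i-1] :: s.drop (i-1+1) := List.drop_eq_getElem_cons hi1
    have hd2 : s.drop (i-1+1) = s[i] :: s.drop (i+1) := by
      have : i - 1 + 1 = i := by omega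
      rw [this]; exact List.drop_eq_getElem_cons hi2
    rw [show (i+2) - 1 = i + 1 from by omega, hd1, hd2]
    rw [show 2*(m+1) = (2*m).succ.succ from by omega, List.take_succ_cons, List.take_succ_cons,
        swapPairs]
    simp [List.getElem?_eq_getElem hi1, List.getElem?_eq_getElem hi2]

-- appending a final pair to an even-length list appends its swap
theorem swapPairs_append_pair : ∀ (t : List Char), t.length % 2 = 0 → ∀ (x y : Char),
    swapPairs (t ++ [x, y]) = swapPairs t ++ [y, x] := by
  intro t
  induction t using swapPairs.induct with
  | case1 => intro _ x y; simp [swapPairs]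
  | case2 a => intro h; simp at h
  | case3 a b t ih =>
    intro h x y
    simp only [List.length_cons] at h
    simp only [List.cons_append, swapPairs]
    rw [ih (by omega)]

-- even-length digit string: A's single loop produces the pair swap of all of s
theorem loopA_even (s temp : List Char) (h : s.length % 2 = 0) :
    loopA s s.length 1 temp = temp ++ swapPairs s := by
  obtain ⟨k, hk⟩ : ∃ k, s.length = 2*k := ⟨s.length/2, by omega⟩
  calc loopA s s.length 1 temp = loopA s (1 - 1 + 2*k) 1 temp := by rw [hk]; norm_num
    _ = temp ++ swapPairs ((s.drop (1-1)).take (2*k)) :=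
        loopA_eq k s 1 temp (le_refl 1) (by omega)
    _ = temp ++ swapPairs s := by
        rw [show (1:Nat) - 1 = 0 from rfl, List.drop_zero, ← hk, List.take_length]

-- odd-length digit string: A's loop over the first n-1 chars plus the trailing
-- 'F'+last equals the pair swap of the 'F'-padded string
theorem loopA_odd (s temp : List Char) (h : s.length % 2 = 1) :
    loopA s (s.length - 1) 1 temp ++ ['F', s.getD (s.length - 1) ' ']
      = temp ++ swapPairs (s ++ ['F']) := by
  have hpos : 0 < s.length := by omega
  have hlast : s.length - 1 < s.length := by omega
  obtain ⟨k, hk⟩ : ∃ k, s.length = 2*k + 1 := ⟨s.length/2, by omega⟩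
  have hk2 : 2*k = s.length - 1 := by omega
  have h1 : loopA s (s.length - 1) 1 temp = temp ++ swapPairs (s.take (s.length - 1)) := by
    calc loopA s (s.length - 1) 1 temp = loopA s (1 - 1 + 2*k) 1 temp := by rw [hk2]; ring_nf
      _ = temp ++ swapPairs ((s.drop (1-1)).take (2*k)) :=
          loopA_eq k s 1 temp (le_refl 1) (by omega)
      _ = temp ++ swapPairs (s.take (s.length - 1)) := by rw [hk2]; simp
  have hsplit : s ++ ['F'] = s.take (s.length - 1) ++ [s[s.length - 1], 'F'] := by
    conv_lhs => rw [← List.take_append_drop (s.length - 1) s]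
    rw [List.drop_eq_getElem_cons hlast, List.drop_eq_nil_of_le (by omega : s.length ≤ s.length - 1 + 1)]
    exact List.append_assoc _ _ _
  rw [h1, hsplit,
      swapPairs_append_pair _ (by rw [List.length_take]; omega),
      List.getD_eq_getElem s ' ' hlast]
  simp

-- core of the strided slice: picking indices 0,2,4,… of s is every2 s
theorem filterMap_stride2 : ∀ (s : List Char),
    List.filterMap (fun k => s[2*k]?) (List.range ((s.length + 1) / 2)) = every2 s := by
  intro s
  induction s using every2.induct with
  | case1 => simp [every2]
  | case2 a => simp [every2, List.range_succ]
  | case3 a b t ih =>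
    have hlen : ((a :: b :: t).length + 1) / 2 = (t.length + 1) / 2 + 1 := by
      simp only [List.length_cons]; omega
    rw [hlen, List.range_succ_eq_map, List.filterMap_cons, List.filterMap_map]
    have e0 : (a :: b :: t)[2*0]? = some a := rfl
    rw [show (fun k => (a :: b :: t)[2*k]?) ∘ Nat.succ = fun k => t[2*k]? from
      funext fun k => by
        simp only [Function.comp]
        rw [show 2 * Nat.succ k = (2*k) + 2 from by omega]
        rfl]
    simp only [e0, ih, every2]

theorem slice?_step2_from0 (s : List Char) :
    PySem.List.slice? s none none 2 = some (every2 s) := by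
  unfold PySem.List.slice? PySem.List.sliceIndices
  simp only [show ¬((2:Int) = 0) from by norm_num, if_false,
    show ¬((2:Int) < 0) from by norm_num, if_false]
  have hcnt : (if (0:Int) < (s.length:Int) then (((s.length:Int) - 0 + 2 - 1) / 2).toNat else 0)
      = (s.length + 1) / 2 := by
    split_ifs with h
    · omega
    · omega
  rw [hcnt, ← filterMap_stride2 s]
  congr 1
  apply List.filterMap_congr
  intro k _
  congr 1
  omega

theorem slice?_step2_from1 (s : List Char) :
    PySem.List.slice? s (some 1) none 2 = some (every2 s.tail) := by
  unfold PySem.List.slice? PySem.List.sliceIndices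
  simp only [show ¬((2:Int) = 0) from by norm_num, if_false,
    show ¬((2:Int) < 0) from by norm_num, if_false,
    show ¬((1:Int) < 0) from by norm_num]
  have hcnt : (if min (1:Int) (s.length:Int) < (s.length:Int) then
      (((s.length:Int) - min (1:Int) (s.length:Int) + 2 - 1) / 2).toNat else 0)
      = (s.tail.length + 1) / 2 := by
    rw [List.length_tail]
    split_ifs with h
    · omega
    · omega
  rw [hcnt]
  have helem : ∀ k, k ∈ List.range ((s.tail.length + 1) / 2) →
      s[(min (1:Int) (s.length:Int) + 2 * (k:Int)).toNat]? = s.tail[2*k]? := by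
    intro k hk
    rw [List.mem_range] at hk
    rw [List.length_tail] at hk
    have hpos : 0 < s.length := by omega
    have hmin : min (1:Int) (s.length:Int) = 1 := by omega
    rw [hmin, show ((1:Int) + 2*(k:Int)).toNat = 1 + 2*k from by omega]
    rw [show s.tail = s.drop 1 from List.drop_one.symm, List.getElem?_drop]
  rw [← filterMap_stride2 s.tail]
  exact congrArg some (List.filterMap_congr helem)

-- every2 through a cons: the head goes to the even column, the tail's columns swap
theorem every2_cons (x : Char) (t : List Char) : every2 (x :: t) = x :: every2 t.tail := by
  cases t with
  | nil => rfl
  | cons c t' => rfl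

-- B's zip-interleave of the two columns is the pair swap of s ('F'-padded when odd)
theorem zip_columns_eq : ∀ (s : List Char),
    (List.zip (every2 s) (every2 s.tail ++ ['F'])).flatMap (fun p => [p.2, p.1])
      = if s.length % 2 = 0 then swapPairs s else swapPairs (s ++ ['F']) := by
  intro s
  induction s using swapPairs.induct with
  | case1 => simp [every2, swapPairs]
  | case2 a => simp [every2, swapPairs]
  | case3 a b t ih =>
    rw [show (a :: b :: t).tail = b :: t from rfl, every2, every2_cons b t]
    simp only [List.cons_append, List.zip_cons_cons, List.flatMap_cons, ih]
    simp only [List.length_cons]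
    by_cases h : t.length % 2 = 0
    · rw [if_pos h, if_pos (by omega : (t.length + 1 + 1) % 2 = 0)]
      simp [swapPairs]
    · rw [if_neg h, if_neg (by omega : ¬ (t.length + 1 + 1) % 2 = 0)]
      simp [swapPairs]

theorem buildPduDa_eq_alt (number TypeOfAddress : String) :
    buildPduDa number TypeOfAddress = buildPduDa_alt number TypeOfAddress := by
  simp only [buildPduDa, buildPduDa_alt, slice?_step2_from0, slice?_step2_from1,
    Option.getD_some, zip_columns_eq]
  by_cases h : (List.dropWhile (fun c => c == '+') number.toList).length % 2 = 0
  · simp only [h, beq_self_eq_true, if_pos]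
    rw [loopA_even _ _ h, List.append_assoc]
  · have hb : ((List.dropWhile (fun c => c == '+') number.toList).length % 2 == 0) = false := by
      simp [h]
    simp only [hb, Bool.false_eq_true, if_false, h]
    rw [loopA_odd _ _ (by omega), List.append_assoc]

-- ===== VERDICT (by name: the statement is the Claim_ definition above) =====
theorem buildPduDa_spec : Claim_equal_buildPduDa := by
  intro number TypeOfAddress _
  unfold Spec_buildPduDa
  exact buildPduDa_eq_alt number TypeOfAddress
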